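-- pv_equiv track=rewrite | github.com/Smaug175/Fizz_GUI | 12月实验数据/数据处理/3-23.py | getdatasignal
-- ===== SOURCE A (Python) =====
-- def getdatasignal(data):
--     long = len(data)
--     t = []
--     x = []
--     y = []
--     for i in range(long):
--         t.append(data[i][0])
--         x.append(3071 - data[i][1])
--         y.append(1919 - data[i][2])
--     return t, x, y
-- ===== SOURCE B (Python) =====
-- def getdatasignal(data):
--     # back-to-front: pop rows off a stack, build reversed columns, then reverse
--     stack = list(data)
--     t, x, y = [], [], []
--     while stack:
--         a, b, c = stack.pop()
--         t.append(a)
--         x.append(3071 - b)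
--         y.append(1919 - c)
--     t.reverse()
--     x.reverse()
--     y.reverse()
--     return t, x, y
-- ===== Notes on version B (the rewrite author's own statement) =====
-- stated objective: alternative
-- what changed: A walks the rows front-to-back by index appending to three lists; B consumes the rows back-to-front with an explicit stack (pop), building the three column lists in reverse, and reverses them at the end.
import Mathlib
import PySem

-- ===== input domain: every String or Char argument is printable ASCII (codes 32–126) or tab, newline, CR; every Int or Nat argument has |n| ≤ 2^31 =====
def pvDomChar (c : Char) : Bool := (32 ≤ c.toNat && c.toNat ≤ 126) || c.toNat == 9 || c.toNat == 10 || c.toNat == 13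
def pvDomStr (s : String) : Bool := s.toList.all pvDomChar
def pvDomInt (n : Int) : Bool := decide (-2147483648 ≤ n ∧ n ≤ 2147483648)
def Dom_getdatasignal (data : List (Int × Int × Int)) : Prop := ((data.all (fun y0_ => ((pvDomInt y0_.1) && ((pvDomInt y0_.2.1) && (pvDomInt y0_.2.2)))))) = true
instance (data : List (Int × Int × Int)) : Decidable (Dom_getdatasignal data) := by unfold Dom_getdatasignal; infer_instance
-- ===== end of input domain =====

-- B consumes the rows back-to-front (explicit stack, pop) building reversed columns, then reverses them; same cost, different construction order.


-- ===== PORT A =====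
-- literal port of A: single forward loop over indices 0..len-1, appending to three accumulators
def getdatasignal (data : List (Int × Int × Int)) : List Int × List Int × List Int :=
  (List.range data.length).foldl
    (fun s i =>
      match PySem.List.pyGet? data (Int.ofNat i) with
      | some r => (s.1 ++ [r.1], s.2.1 ++ [3071 - r.2.1], s.2.2 ++ [1919 - r.2.2])
      | none => s)  -- unreachable: i < len(data)
    ([], [], [])

-- ===== PORT B =====
-- the 'while stack: … stack.pop()' loop of Source B: pop the last row, append to the three reversed accumulators
def getdatasignalAltLoop (stack : List (Int × Int × Int)) (t x y : List Int) :
    List Int × List Int × List Int :=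
  match h : stack.getLast? with
  | none => (t, x, y)
  | some r =>
    getdatasignalAltLoop stack.dropLast (t ++ [r.1]) (x ++ [3071 - r.2.1]) (y ++ [1919 - r.2.2])
termination_by stack.length
decreasing_by
  have hne : stack ≠ [] := by intro e; subst e; simp at h
  have := List.length_pos_of_ne_nil hne
  simp [List.length_dropLast]; omega

-- port of B: copy the data onto a stack, run the pop loop, reverse the three results
def getdatasignal_alt (data : List (Int × Int × Int)) : List Int × List Int × List Int :=
  let stack := data
  let s := getdatasignalAltLoop stack [] [] []
  (s.1.reverse, s.2.1.reverse, s.2.2.reverse)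

-- ===== PRECONDITION & SPEC =====
def Spec_getdatasignal (data : List (Int × Int × Int)) (out : List Int × List Int × List Int) : Prop := out = getdatasignal_alt data
instance (data : List (Int × Int × Int)) (out : List Int × List Int × List Int) : Decidable (Spec_getdatasignal data out) := by unfold Spec_getdatasignal; infer_instance

-- ===== CLAIM (what is proved, stated in full; the proofs are below) =====
def Claim_equal_getdatasignal : Prop := ∀ (data : List (Int × Int × Int)), Dom_getdatasignal data → Spec_getdatasignal data (getdatasignal data)

-- ===== LEMMAS AND PROOFS =====
-- A's forward loop produces the three column maps of the first n rows
theorem getdatasignal_loopA (data : List (Int × Int × Int)) :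
    ∀ (n : Nat), n ≤ data.length → ∀ (acc : List Int × List Int × List Int),
      (List.range n).foldl
        (fun s i =>
          match PySem.List.pyGet? data (Int.ofNat i) with
          | some r => (s.1 ++ [r.1], s.2.1 ++ [3071 - r.2.1], s.2.2 ++ [1919 - r.2.2])
          | none => s) acc
      = (acc.1 ++ (data.take n).map (fun r => r.1),
         acc.2.1 ++ (data.take n).map (fun r => 3071 - r.2.1),
         acc.2.2 ++ (data.take n).map (fun r => 1919 - r.2.2)) := by
  intro n
  induction n with
  | zero => intro _ acc; simp
  | succ m ih =>
    intro hle acc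
    have hm : m < data.length := by omega
    rw [List.range_succ, List.foldl_append, ih (by omega) acc]
    have hget : PySem.List.pyGet? data (Int.ofNat m) = some data[m] :=
      PySem.List.pyGet?_ofNat data m hm
    simp only [List.foldl_cons, List.foldl_nil, hget]
    have htake : data.take (m + 1) = data.take m ++ [data[m]] :=
      List.take_succ_eq_append_getElem hm
    simp only [htake, List.map_append, List.map_cons, List.map_nil, List.append_assoc]

-- B's pop loop produces the three column maps of the REVERSED stack
theorem getdatasignal_loopB (stack : List (Int × Int × Int)) :
    ∀ (t x y : List Int),
      getdatasignalAltLoop stack t x y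
      = (t ++ stack.reverse.map (fun r => r.1),
         x ++ stack.reverse.map (fun r => 3071 - r.2.1),
         y ++ stack.reverse.map (fun r => 1919 - r.2.2)) := by
  induction stack using List.reverseRecOn with
  | nil => intro t x y; rw [getdatasignalAltLoop]; simp
  | append_singleton init r ih =>
    intro t x y
    rw [getdatasignalAltLoop]
    simp only [List.dropLast_concat, ih]
    split
    · next heq => rw [List.getLast?_concat] at heq; cases heq
    · next r1 heq =>
        rw [List.getLast?_concat] at heq
        injection heq with h2
        subst h2
        simp [List.append_assoc]

theorem getdatasignal_spec : Claim_equal_getdatasignal := by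
  intro data _
  unfold Spec_getdatasignal getdatasignal getdatasignal_alt
  rw [getdatasignal_loopA data data.length (le_refl _) ([], [], [])]
  simp only [getdatasignal_loopB, List.map_reverse, List.reverse_reverse,
    List.nil_append, List.take_length]
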